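-- pv_equiv track=rewrite | github.com/Lykit01/Lykit-for-chinese-dialects-field-work | cdfw.py | get_multi_tones
-- ===== SOURCE A (Python) =====
-- def get_multi_tones(x):
--     xs=x.split(' ')
--     for k in range(len(xs)):
--         for i in range(len(xs[k])-1,0,-1):
--             if xs[k][i] not in '0123456789':
--                 if xs[k][i] in '?ptk':
--                     xs[k]=xs[k][i+1:]+'入'
--                 else:xs[k]=xs[k][i+1:]
--                 break
--     return ' '.join(xs)
-- ===== SOURCE B (Python) =====
-- def get_multi_tones(x):
--     # one forward pass over the string: per word, keep the current trailing
--     # digit run and the last non-digit character seen at position >= 1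
--     res = []
--     cur = []          # characters of the current word
--     tail = []         # current trailing digit run of the word
--     last_nd = None    # last non-digit at position >= 1 in the word, if any
--     def flush():
--         if last_nd is None:
--             return ''.join(cur)
--         return ''.join(tail) + ('入' if last_nd in '?ptk' else '')
--     for c in x:
--         if c == ' ':
--             res.append(flush())
--             cur, tail, last_nd = [], [], None
--         elif c in '0123456789':
--             cur.append(c)
--             tail.append(c)
--         else:
--             if cur:
--                 last_nd = c
--             cur.append(c)
--             tail = []
--     res.append(flush())
--     return ' '.join(res)
-- ===== Notes on version B (the rewrite author's own statement) =====
-- stated objective: alternative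
-- what changed: Replaces split-into-words plus a backward per-word scan for the last non-digit with a single forward character-by-character state machine over the whole string that maintains, per word, the current trailing digit run and the last non-digit seen at position >= 1, flushing on each space.
import Mathlib
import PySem

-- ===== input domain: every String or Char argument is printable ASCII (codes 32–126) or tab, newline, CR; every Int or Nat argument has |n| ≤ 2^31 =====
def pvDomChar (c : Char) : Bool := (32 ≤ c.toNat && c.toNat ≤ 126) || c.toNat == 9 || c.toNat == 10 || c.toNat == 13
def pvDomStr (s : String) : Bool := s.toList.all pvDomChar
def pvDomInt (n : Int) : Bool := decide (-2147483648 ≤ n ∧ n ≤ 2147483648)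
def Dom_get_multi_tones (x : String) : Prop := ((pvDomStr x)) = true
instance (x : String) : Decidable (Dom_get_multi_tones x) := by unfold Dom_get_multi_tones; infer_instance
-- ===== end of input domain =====

-- B replaces A's split + backward per-word index scan with one forward state-machine pass
-- over the whole string (trailing digit run + last non-digit at position ≥ 1, flushed at spaces).

-- ===== PORT A =====
def pvDigits : List Char := "0123456789".toList
def pvPtk : List Char := "?ptk".toList

-- 'for i in range(len(w)-1, 0, -1): if w[i] not in "0123456789": …; break' — the argument 0 means the range ran out without a break
def pvALoop (w : List Char) : Nat → List Char
  | 0 => w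
  | (i+1) =>
    let c := w.getD (i+1) ' '               -- w[i]; the index is in range on every call
    if pvDigits.contains c then pvALoop w i -- digit: continue downwards
    else if pvPtk.contains c then w.drop (i+2) ++ ['入']   -- w[i+1:] + '入', break
    else w.drop (i+2)                                      -- w[i+1:], break

def pvAWord (w : List Char) : List Char := pvALoop w (w.length - 1)

def get_multi_tones (x : String) : String :=
  String.ofList (PySem.Chars.join [' '] ((PySem.Chars.splitOn x.toList [' ']).map pvAWord))

-- ===== PORT B =====
-- state of B's forward pass: finished words, current word, its trailing digit run, last non-digit at position ≥ 1
structure BSt where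
  res : List (List Char)
  cur : List Char
  tail : List Char
  lastNd : Option Char
deriving Repr, DecidableEq

def pvFlush (st : BSt) : List Char :=
  match st.lastNd with
  | none => st.cur
  | some c => st.tail ++ (if pvPtk.contains c then ['入'] else [])

def pvStep (st : BSt) (c : Char) : BSt :=
  if c = ' ' then ⟨st.res ++ [pvFlush st], [], [], none⟩
  else if pvDigits.contains c then ⟨st.res, st.cur ++ [c], st.tail ++ [c], st.lastNd⟩
  else ⟨st.res, st.cur ++ [c], [], if st.cur.isEmpty then st.lastNd else some c⟩

def get_multi_tones_alt (x : String) : String :=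
  let st := x.toList.foldl pvStep ⟨[], [], [], none⟩
  String.ofList (PySem.Chars.join [' '] (st.res ++ [pvFlush st]))

-- ===== PRECONDITION & SPEC =====
def Spec_get_multi_tones (x : String) (out : String) : Prop := out = get_multi_tones_alt x
instance (x : String) (out : String) : Decidable (Spec_get_multi_tones x out) := by unfold Spec_get_multi_tones; infer_instance

-- ===== CLAIM =====
def Claim_equal_get_multi_tones : Prop := ∀ (x : String), Dom_get_multi_tones x → Spec_get_multi_tones x (get_multi_tones x)

-- ===== LEMMAS AND PROOFS =====

-- the trailing digit run of a word
def pvTdig (w : List Char) : List Char := (w.reverse.takeWhile (pvDigits.contains ·)).reverse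
-- the last non-digit at position ≥ 1 of a word, if any
def pvLnd (w : List Char) : Option Char := (w.drop 1).reverse.find? (fun c => !pvDigits.contains c)
-- what B emits for a finished word
def pvWordOut (w : List Char) : List Char :=
  match pvLnd w with
  | none => w
  | some c => pvTdig w ++ (if pvPtk.contains c then ['入'] else [])

-- reference split on a single space, structural recursion
def pvMySplit (pre : List Char) : List Char → List (List Char)
  | [] => [pre]
  | c :: rest => if c = ' ' then pre :: pvMySplit [] rest else pvMySplit (pre ++ [c]) rest

theorem pv_splitOn_go (fuel : Nat) : ∀ (l cur : List Char) (acc : List (List Char)),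
    l.length < fuel →
    PySem.Chars.splitOn.go [' '] fuel l cur acc = acc.reverse ++ pvMySplit cur.reverse l := by
  induction fuel with
  | zero => intro l cur acc h; omega
  | succ fuel ih =>
    intro l cur acc h
    cases l with
    | nil =>
      rw [PySem.Chars.splitOn.go]
      · simp [pvMySplit]
      · omega
    | cons c rest =>
      rw [PySem.Chars.splitOn.go]
      by_cases hc : c = ' '
      · subst hc
        rw [if_pos (by simp [List.isPrefixOf])]
        rw [ih _ _ _ (by simpa using Nat.lt_of_succ_lt_succ h)]
        simp [pvMySplit]
      · rw [if_neg (by simp [List.isPrefixOf]; intro h'; exact (hc h'.symm).elim)]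
        rw [ih _ _ _ (by simpa using Nat.lt_of_succ_lt_succ h)]
        simp [pvMySplit, hc]

theorem pv_splitOn_eq_mySplit (l : List Char) :
    PySem.Chars.splitOn l [' '] = pvMySplit [] l := by
  unfold PySem.Chars.splitOn
  rw [pv_splitOn_go (l.length + 1) l [] [] (by omega)]
  simp

theorem pv_mySplit_no_space (w : List Char) (h : ' ' ∉ w) (pre : List Char) :
    pvMySplit pre w = [pre ++ w] := by
  induction w generalizing pre with
  | nil => simp [pvMySplit]
  | cons c rest ih =>
    have hc : c ≠ ' ' := fun hcc => h (hcc ▸ List.mem_cons_self)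
    rw [pvMySplit, if_neg hc, ih (fun hm => h (List.mem_cons_of_mem _ hm))]
    simp

theorem pv_mySplit_break (w : List Char) (h : ' ' ∉ w) (rest pre : List Char) :
    pvMySplit pre (w ++ ' ' :: rest) = (pre ++ w) :: pvMySplit [] rest := by
  induction w generalizing pre with
  | nil => simp [pvMySplit]
  | cons c t ih =>
    have hc : c ≠ ' ' := fun hcc => h (hcc ▸ List.mem_cons_self)
    rw [List.cons_append, pvMySplit, if_neg hc, ih (fun hm => h (List.mem_cons_of_mem _ hm))]
    simp

-- B's pass over a space-free word computes exactly (word, trailing digits, last non-digit ≥ 1)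
theorem pv_fold_word (w : List Char) (h : ' ' ∉ w) (res : List (List Char)) :
    w.foldl pvStep ⟨res, [], [], none⟩ = ⟨res, w, pvTdig w, pvLnd w⟩ := by
  induction w using List.reverseRecOn with
  | nil => simp [pvTdig, pvLnd]
  | append_singleton l c ih =>
    have hl : ' ' ∉ l := fun hm => h (List.mem_append_left _ hm)
    have hc : c ≠ ' ' := fun hcc => h (by simp [hcc])
    rw [List.foldl_append, ih hl]
    simp only [List.foldl_cons, List.foldl_nil]
    rw [pvStep, if_neg hc]
    by_cases hd : pvDigits.contains c = true
    · rw [if_pos hd]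
      have hdm : c ∈ pvDigits := by simpa using hd
      have ht : pvTdig (l ++ [c]) = pvTdig l ++ [c] := by
        simp [pvTdig, hdm]
      have hn : pvLnd (l ++ [c]) = pvLnd l := by
        cases l with
        | nil => simp [pvLnd]
        | cons a t => simp [pvLnd, hdm]
      rw [ht, hn]
    · rw [if_neg hd]
      have hdm : c ∉ pvDigits := by simpa using hd
      have ht : pvTdig (l ++ [c]) = [] := by
        simp [pvTdig, hdm]
      rw [ht]
      cases l with
      | nil => simp [pvLnd]
      | cons a t =>
        have hn : pvLnd (a :: t ++ [c]) = some c := by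
          simp [pvLnd, hdm]
        rw [hn]
        simp

theorem pv_flush_state (res : List (List Char)) (w : List Char) :
    pvFlush ⟨res, w, pvTdig w, pvLnd w⟩ = pvWordOut w := by
  cases hl : pvLnd w <;> simp [pvFlush, pvWordOut, hl]

theorem pv_lnd_none (w : List Char)
    (hinv : ∀ j, (hj : j < w.length) → 0 < j → pvDigits.contains w[j] = true) :
    pvLnd w = none := by
  rw [pvLnd, List.find?_eq_none]
  intro x hx
  rw [List.mem_reverse] at hx
  obtain ⟨k, hk, rfl⟩ := List.mem_iff_getElem.mp hx
  rw [List.getElem_drop]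
  rw [List.length_drop] at hk
  have := hinv (1+k) (by omega) (by omega)
  simpa using this

theorem pv_takeWhile_concat (p : Char → Bool) (l1 : List Char) (c : Char) (l2 : List Char)
    (h1 : ∀ x ∈ l1, p x = true) (hc : p c = false) :
    (l1 ++ c :: l2).takeWhile p = l1 := by
  induction l1 with
  | nil => simp [hc]
  | cons a t ih =>
    rw [List.cons_append, List.takeWhile_cons, h1 a List.mem_cons_self]
    simp [ih (fun x hx => h1 x (List.mem_cons_of_mem _ hx))]

theorem pv_find?_concat (p : Char → Bool) (l1 : List Char) (c : Char) (l2 : List Char)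
    (h1 : ∀ x ∈ l1, p x = false) (hc : p c = true) :
    (l1 ++ c :: l2).find? p = some c := by
  induction l1 with
  | nil => simp [hc]
  | cons a t ih =>
    rw [List.cons_append, List.find?_cons, h1 a List.mem_cons_self]
    exact ih (fun x hx => h1 x (List.mem_cons_of_mem _ hx))

theorem pv_drop_digits (w : List Char) (i : Nat) (hi : i+1 < w.length)
    (hinv : ∀ j, (hj : j < w.length) → i+1 < j → pvDigits.contains w[j] = true) :
    ∀ x ∈ (w.drop (i+2)).reverse, pvDigits.contains x = true := by
  intro x hx
  rw [List.mem_reverse] at hx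
  obtain ⟨k, hk, rfl⟩ := List.mem_iff_getElem.mp hx
  rw [List.getElem_drop]
  rw [List.length_drop] at hk
  exact hinv _ (by omega) (by omega)

theorem pv_tdig_of_break (w : List Char) (i : Nat) (hi : i+1 < w.length)
    (hc : pvDigits.contains w[i+1] = false)
    (hinv : ∀ j, (hj : j < w.length) → i+1 < j → pvDigits.contains w[j] = true) :
    pvTdig w = w.drop (i+2) := by
  have htake : w.take (i+2) = w.take (i+1) ++ [w[i+1]] := by
    rw [List.take_add_one, List.getElem?_eq_getElem hi]; rfl
  have hrev : w.reverse = (w.drop (i+2)).reverse ++ w[i+1] :: (w.take (i+1)).reverse := by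
    conv_lhs => rw [← List.take_append_drop (i+2) w]
    rw [htake, List.reverse_append, List.reverse_append]
    simp
  rw [pvTdig, hrev, pv_takeWhile_concat _ _ _ _ (pv_drop_digits w i hi hinv) hc]
  simp

theorem pv_lnd_of_break (w : List Char) (i : Nat) (hi : i+1 < w.length)
    (hc : pvDigits.contains w[i+1] = false)
    (hinv : ∀ j, (hj : j < w.length) → i+1 < j → pvDigits.contains w[j] = true) :
    pvLnd w = some w[i+1] := by
  have hlen1 : i < (w.drop 1).length := by rw [List.length_drop]; omega
  have hgd : (w.drop 1)[i]'hlen1 = w[i+1] := by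
    rw [List.getElem_drop]
    congr 1
    omega
  have htake : (w.drop 1).take (i+1) = (w.drop 1).take i ++ [w[i+1]] := by
    rw [List.take_add_one, List.getElem?_eq_getElem hlen1, hgd]; rfl
  have hdd : (w.drop 1).drop (i+1) = w.drop (i+2) := by
    rw [List.drop_drop]
    congr 1
    omega
  have hrev : (w.drop 1).reverse
      = (w.drop (i+2)).reverse ++ w[i+1] :: ((w.drop 1).take i).reverse := by
    conv_lhs => rw [← List.take_append_drop (i+1) (w.drop 1)]
    rw [htake, hdd, List.reverse_append, List.reverse_append]
    simp
  rw [pvLnd, hrev]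
  refine pv_find?_concat _ _ _ _ (fun x hx => ?_) (by simp only [hc, Bool.not_false])
  have := pv_drop_digits w i hi hinv x hx
  simp only [this, Bool.not_true]

theorem pvALoop_eq_wordOut (w : List Char) (i : Nat) (hi : i < w.length)
    (hinv : ∀ j, (hj : j < w.length) → i < j → pvDigits.contains w[j] = true) :
    pvALoop w i = pvWordOut w := by
  induction i with
  | zero =>
    rw [pvWordOut.eq_def, pv_lnd_none w (fun j hj h0 => hinv j hj h0)]
    simp [pvALoop]
  | succ i ih =>
    have hgd : w.getD (i+1) ' ' = w[i+1] := List.getD_eq_getElem w ' ' hi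
    by_cases hd : pvDigits.contains w[i+1] = true
    · simp only [pvALoop, hgd, hd, if_true]
      refine ih (by omega) (fun j hj hij => ?_)
      rcases Nat.lt_or_ge (i+1) j with h | h
      · exact hinv j hj h
      · have : j = i+1 := by omega
        subst this; exact hd
    · have hc : pvDigits.contains w[i+1] = false := by simpa using hd
      rw [pvWordOut.eq_def, pv_lnd_of_break w i hi hc hinv]
      simp only [pvALoop, hgd, hc, Bool.false_eq_true, if_false,
        pv_tdig_of_break w i hi hc hinv]
      by_cases hp : w[i+1] ∈ pvPtk <;> simp [hp]

theorem pvAWord_eq_wordOut (w : List Char) : pvAWord w = pvWordOut w := by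
  unfold pvAWord
  match w with
  | [] => simp [pvALoop, pvWordOut, pvLnd]
  | c :: t =>
    exact pvALoop_eq_wordOut (c :: t) ((c :: t).length - 1) (by simp)
      (fun j hj hij => by simp at hj; omega)

theorem pv_key : ∀ (n : Nat) (cs : List Char) (res : List (List Char)), cs.length ≤ n →
    (cs.foldl pvStep ⟨res, [], [], none⟩).res ++ [pvFlush (cs.foldl pvStep ⟨res, [], [], none⟩)]
      = res ++ (pvMySplit [] cs).map pvAWord := by
  intro n
  induction n with
  | zero =>
    intro cs res h
    have hnil : cs = [] := List.eq_nil_of_length_eq_zero (Nat.le_zero.mp h)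
    subst hnil
    simp [pvFlush, pvMySplit, pvAWord, pvALoop]
  | succ n ih =>
    intro cs res h
    by_cases hsp : ' ' ∈ cs
    · -- split off the first word
      obtain ⟨w, rest, hw, hcs, hlen⟩ :
          ∃ w rest, ' ' ∉ w ∧ cs = w ++ ' ' :: rest ∧ rest.length ≤ n := by
        refine ⟨cs.takeWhile (· ≠ ' '), (cs.dropWhile (· ≠ ' ')).tail, ?_, ?_, ?_⟩
        · intro hm
          have := List.mem_takeWhile_imp hm
          simp at this
        · have hne : cs.dropWhile (· ≠ ' ') ≠ [] := by
            intro hnil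
            rw [List.dropWhile_eq_nil_iff] at hnil
            have := hnil ' ' hsp
            simp at this
          have hhead : (cs.dropWhile (· ≠ ' ')).head hne = ' ' := by
            have := List.head_dropWhile_not (p := (· ≠ ' ')) (l := cs) hne
            simpa using this
          conv_lhs => rw [← List.takeWhile_append_dropWhile (p := (· ≠ ' ')) (l := cs)]
          congr 1
          have hct := List.cons_head_tail hne
          rw [hhead] at hct
          exact hct.symm
        · have h1 : (cs.takeWhile (· ≠ ' ')).length + (cs.dropWhile (· ≠ ' ')).length
              = cs.length := by
            rw [← List.length_append, List.takeWhile_append_dropWhile]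
          have hne : cs.dropWhile (· ≠ ' ') ≠ [] := by
            intro hnil
            rw [List.dropWhile_eq_nil_iff] at hnil
            have := hnil ' ' hsp
            simp at this
          have h2 : ((cs.dropWhile (· ≠ ' ')).tail).length
              = (cs.dropWhile (· ≠ ' ')).length - 1 := List.length_tail
          have h3 : 0 < (cs.dropWhile (· ≠ ' ')).length := List.length_pos_iff.mpr hne
          omega
      subst hcs
      rw [List.foldl_append, pv_fold_word w hw res]
      simp only [List.foldl_cons]
      have hst : pvStep ⟨res, w, pvTdig w, pvLnd w⟩ ' ' = ⟨res ++ [pvAWord w], [], [], none⟩ := by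
        rw [pvStep, if_pos rfl, pv_flush_state, ← pvAWord_eq_wordOut]
      rw [hst, ih rest (res ++ [pvAWord w]) hlen, pv_mySplit_break w hw rest []]
      simp
    · rw [pv_fold_word cs hsp res, pv_mySplit_no_space cs hsp []]
      simp [pv_flush_state, pvAWord_eq_wordOut]

-- ===== VERDICT =====
theorem get_multi_tones_spec : Claim_equal_get_multi_tones := by
  intro x _
  unfold Spec_get_multi_tones get_multi_tones get_multi_tones_alt
  rw [pv_splitOn_eq_mySplit]
  have h := pv_key x.toList.length x.toList [] (le_refl _)
  simp only [List.nil_append] at h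
  rw [← h]
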